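-- pv_equiv track=rewrite | github.com/prithiviraj-mohanraj/python-daily-practice | day1_value_trackers.py | second_max_salary
-- ===== SOURCE A (Python) =====
-- def second_max_salary(employees: dict[str, int]) -> list[str] | None:
--     """
--     Returns a list of employee names who have the second highest unique salary.
--     Time: O(n), Space: O(1)
--     """
--     first = second = float("-inf")
--     for salary in employees.values():
--         if salary > first:
--             second = first
--             first = salary
--         elif first > salary > second:
--             second = salary
--
--     if second == float("-inf"):
--         return None
--
--     return [name for name, sal in employees.items() if sal == second]
-- ===== SOURCE B (Python) =====
-- def second_max_salary(employees: dict[str, int]) -> list[str] | None: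
--     """Sort the distinct salaries descending; the entry at index 1 (if any)
--     is the second-highest unique salary."""
--     uniq = sorted(set(employees.values()), reverse=True)
--     if len(uniq) < 2:
--         return None
--     target = uniq[1]
--     return [name for name, sal in employees.items() if sal == target]
-- ===== Notes on version B (the rewrite author's own statement) =====
-- stated objective: simpler
-- what changed: Replaces the streaming two-variable (first/second) max-tracking loop with -inf sentinels by sorting the set of distinct salaries in descending order and taking the element at index 1 (None when fewer than two distinct salaries exist).
import Mathlib
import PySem

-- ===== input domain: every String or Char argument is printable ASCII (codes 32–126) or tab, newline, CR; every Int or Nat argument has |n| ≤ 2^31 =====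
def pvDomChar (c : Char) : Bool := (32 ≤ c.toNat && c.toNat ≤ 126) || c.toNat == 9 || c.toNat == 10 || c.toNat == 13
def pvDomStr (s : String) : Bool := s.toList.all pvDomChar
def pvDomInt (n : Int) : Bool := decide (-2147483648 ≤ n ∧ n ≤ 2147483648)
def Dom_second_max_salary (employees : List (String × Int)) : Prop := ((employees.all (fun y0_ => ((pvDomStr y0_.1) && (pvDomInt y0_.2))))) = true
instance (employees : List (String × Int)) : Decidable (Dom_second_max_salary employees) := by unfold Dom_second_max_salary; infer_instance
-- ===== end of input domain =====

-- B replaces A's streaming two-variable (first/second) max tracking by sorting the distinct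
-- salaries in descending order and indexing; objective: simpler.

-- ===== PORT A =====
-- A's float("-inf") sentinel is modeled as `none` ("no value yet"); the comparisons against it
-- (`salary > -inf` always true, `-inf > salary` always false) are written out in the match arms.
def smsStep (fs : Option Int × Option Int) (salary : Int) : Option Int × Option Int :=
  if (match fs.1 with | none => true | some f => decide (f < salary)) then
    (some salary, fs.1)
  else if ((match fs.1 with | none => false | some f => decide (salary < f)) &&
           (match fs.2 with | none => true | some s => decide (s < salary))) then
    (fs.1, some salary)
  else fs

def second_max_salary (employees : List (String × Int)) : Option (List String) :=
  let fs := (employees.map Prod.snd).foldl smsStep (none, none)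
  match fs.2 with
  | none => none
  | some second => some ((employees.filter (fun p => p.2 == second)).map Prod.fst)

-- ===== PORT B =====
def second_max_salary_alt (employees : List (String × Int)) : Option (List String) :=
  let uniq := PySem.List.sorted (PySem.Set.ofList (employees.map Prod.snd)) (fun x => x) true
  if uniq.length < 2 then none
  else
    match PySem.List.pyGet? uniq 1 with
    | none => none  -- unreachable: uniq has length ≥ 2 here
    | some target => some ((employees.filter (fun p => p.2 == target)).map Prod.fst)

-- ===== PRECONDITION & SPEC =====
def Spec_second_max_salary (employees : List (String × Int)) (out : Option (List String)) : Prop := out = second_max_salary_alt employees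
instance (employees : List (String × Int)) (out : Option (List String)) : Decidable (Spec_second_max_salary employees out) := by unfold Spec_second_max_salary; infer_instance

-- ===== CLAIM (what is proved, stated in full; the proofs are below) =====
def Claim_equal_second_max_salary : Prop := ∀ (employees : List (String × Int)), Dom_second_max_salary employees → Spec_second_max_salary employees (second_max_salary employees)

-- ===== LEMMAS AND PROOFS =====

-- insert a value into a strictly-descending list of the distinct values seen so far
def smsIns (v : Int) : List Int → List Int
  | [] => [v]
  | x :: xs => if x < v then v :: x :: xs else if v = x then x :: xs else x :: smsIns v xs

def smsSDL (vs : List Int) : List Int := vs.foldl (fun acc v => smsIns v acc) []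

theorem mem_smsIns (v y : Int) (L : List Int) : y ∈ smsIns v L ↔ y = v ∨ y ∈ L := by
  induction L with
  | nil => simp [smsIns]
  | cons x xs ih =>
    simp only [smsIns]
    split_ifs with h1 h2
    · simp
    · subst h2; simp
    · simp [ih]; tauto

theorem pairwise_smsIns (v : Int) (L : List Int) (h : L.Pairwise (· > ·)) :
    (smsIns v L).Pairwise (· > ·) := by
  induction L with
  | nil => simp [smsIns]
  | cons x xs ih =>
    rcases List.pairwise_cons.mp h with ⟨hx, hxs⟩
    simp only [smsIns]
    split_ifs with h1 h2
    · exact List.pairwise_cons.mpr ⟨by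
        intro y hy
        rcases List.mem_cons.mp hy with rfl | hy
        · exact h1
        · exact lt_trans (hx y hy) h1, h⟩
    · exact h
    · refine List.pairwise_cons.mpr ⟨?_, ih hxs⟩
      intro y hy
      rcases (mem_smsIns v y xs).mp hy with rfl | hy
      · omega
      · exact hx y hy

theorem step_smsIns (v : Int) (L : List Int) :
    smsStep (L[0]?, L[1]?) v = ((smsIns v L)[0]?, (smsIns v L)[1]?) := by
  match L with
  | [] => simp [smsStep, smsIns]
  | [x] =>
    simp only [smsStep, smsIns]
    split_ifs with h1 h2 <;> simp_all <;> try omega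
  | x :: y :: rest =>
    simp only [smsStep, smsIns]
    split_ifs with h1 h2 h3 h4 h5 h6 <;> simp_all <;> try omega

theorem foldl_smsStep (vs : List Int) : ∀ (L : List Int),
    vs.foldl smsStep (L[0]?, L[1]?) =
      ((vs.foldl (fun acc v => smsIns v acc) L)[0]?, (vs.foldl (fun acc v => smsIns v acc) L)[1]?) := by
  induction vs with
  | nil => intro L; simp
  | cons v vs ih =>
    intro L
    rw [List.foldl_cons, step_smsIns, ih (smsIns v L), List.foldl_cons]

theorem pairwise_smsSDL (vs : List Int) : (smsSDL vs).Pairwise (· > ·) := by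
  suffices h : ∀ (L : List Int), L.Pairwise (· > ·) →
      (vs.foldl (fun acc v => smsIns v acc) L).Pairwise (· > ·) from h [] (by simp)
  induction vs with
  | nil => intro L hL; simpa using hL
  | cons v vs ih => intro L hL; exact ih _ (pairwise_smsIns v L hL)

theorem mem_smsSDL (vs : List Int) (y : Int) : y ∈ smsSDL vs ↔ y ∈ vs := by
  suffices h : ∀ (L : List Int), y ∈ vs.foldl (fun acc v => smsIns v acc) L ↔ y ∈ L ∨ y ∈ vs by
    simpa using h []
  induction vs with
  | nil => intro L; simp
  | cons v vs ih =>
    intro L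
    rw [List.foldl_cons, ih (smsIns v L), mem_smsIns]
    simp; tauto

theorem sorted_set_eq_smsSDL (vs : List Int) :
    PySem.List.sorted (PySem.Set.ofList vs) (fun x => x) true = smsSDL vs := by
  apply PySem.List.sorted_rev_eq_of_perm_of_pairwise_gt
  · rw [List.perm_ext_iff_of_nodup
      ((pairwise_smsSDL vs).imp (fun h => ne_of_gt h))
      (PySem.Set.nodup_ofList vs)]
    intro a
    rw [mem_smsSDL, PySem.Set.mem_ofList]
  · exact pairwise_smsSDL vs

-- ===== VERDICT (by name: the statement is the Claim_ definition above) =====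
theorem second_max_salary_spec : Claim_equal_second_max_salary := by
  intro employees _
  unfold Spec_second_max_salary second_max_salary second_max_salary_alt
  have hfold : (employees.map Prod.snd).foldl smsStep (none, none) =
      ((smsSDL (employees.map Prod.snd))[0]?, (smsSDL (employees.map Prod.snd))[1]?) :=
    foldl_smsStep (employees.map Prod.snd) []
  simp only [hfold, sorted_set_eq_smsSDL]
  generalize smsSDL (employees.map Prod.snd) = L
  match L with
  | [] => simp
  | [x] => simp
  | x :: y :: rest =>
    have : PySem.List.pyIdx? (rest.length + 1 + 1) 1 = some 1 := by
      simp [PySem.List.pyIdx?]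
    simp [PySem.List.pyGet?, this]
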